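-- pv_equiv track=rewrite | github.com/nyanp/nfl-player-contact-detection | kmat/train_utils/dataloader_3inputs.py | split_to_list
-- ===== SOURCE A (Python) =====
-- def split_to_list(inputs, sizes):
--     outputs = []
--     start = 0
--     for size in sizes:
--         end = start + size
--         outputs += [inputs[start:end]]
--         start = end
--     return outputs
-- ===== SOURCE B (Python) =====
-- def split_to_list(inputs, sizes):
--     # Precompute boundary offsets (prefix sums), then slice between consecutive pairs.
--     offsets = [0]
--     for s in sizes:
--         offsets.append(offsets[-1] + s)
--     return [inputs[a:b] for a, b in zip(offsets, offsets[1:])]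
-- ===== Notes on version B (the rewrite author's own statement) =====
-- stated objective: alternative
-- what changed: Replaces the running mutable 'start' accumulator with a precomputed prefix-sum offset table followed by a zip-over-consecutive-pairs slicing pass.
import Mathlib
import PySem

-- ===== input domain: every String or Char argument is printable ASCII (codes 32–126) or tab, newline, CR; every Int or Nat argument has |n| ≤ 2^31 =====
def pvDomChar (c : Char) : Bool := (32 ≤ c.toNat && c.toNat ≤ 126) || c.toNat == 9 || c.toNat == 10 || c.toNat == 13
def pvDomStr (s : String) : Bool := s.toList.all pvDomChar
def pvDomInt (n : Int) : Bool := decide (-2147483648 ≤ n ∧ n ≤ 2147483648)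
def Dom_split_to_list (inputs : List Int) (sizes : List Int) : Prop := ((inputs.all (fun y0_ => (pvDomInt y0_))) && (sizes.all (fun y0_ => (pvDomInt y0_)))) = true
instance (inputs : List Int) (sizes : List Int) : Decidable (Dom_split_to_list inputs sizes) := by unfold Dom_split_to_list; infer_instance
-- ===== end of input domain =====

-- B replaces A's running 'start' accumulator with a precomputed prefix-sum offset
-- table and a zip-over-consecutive-pairs slicing pass (alternative decomposition).


-- ===== PORT A =====
-- fold over sizes carrying (outputs, start); slice is PySem.List.slice = Python's inputs[start:end]
def split_to_list (inputs : List Int) (sizes : List Int) : List (List Int) :=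
  (sizes.foldl
    (fun (p : List (List Int) × Int) size =>
      (p.1 ++ [PySem.List.slice inputs (some p.2) (some (p.2 + size))], p.2 + size))
    ([], 0)).1

-- ===== PORT B =====
-- offsets after the initial 0: each step appends previous offset + size (Python: offsets.append(offsets[-1]+s))
def pvOffsets : Int → List Int → List Int
  | _, [] => []
  | st, s :: rest => (st + s) :: pvOffsets (st + s) rest

def split_to_list_alt (inputs : List Int) (sizes : List Int) : List (List Int) :=
  let offsets : List Int := 0 :: pvOffsets 0 sizes
  (offsets.zip offsets.tail).map (fun ab => PySem.List.slice inputs (some ab.1) (some ab.2))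

-- ===== PRECONDITION & SPEC =====
def Spec_split_to_list (inputs : List Int) (sizes : List Int) (out : List (List Int)) : Prop := out = split_to_list_alt inputs sizes
instance (inputs : List Int) (sizes : List Int) (out : List (List Int)) : Decidable (Spec_split_to_list inputs sizes out) := by unfold Spec_split_to_list; infer_instance

-- ===== CLAIM (what is proved, stated in full; the proofs are below) =====
def Claim_equal_split_to_list : Prop := ∀ (inputs : List Int) (sizes : List Int), Dom_split_to_list inputs sizes → Spec_split_to_list inputs sizes (split_to_list inputs sizes)

-- ===== LEMMAS AND PROOFS =====
theorem split_foldl_eq (inputs : List Int) :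
    ∀ (sizes : List Int) (st : Int) (acc : List (List Int)),
    (sizes.foldl
      (fun (p : List (List Int) × Int) size =>
        (p.1 ++ [PySem.List.slice inputs (some p.2) (some (p.2 + size))], p.2 + size))
      (acc, st)).1
    = acc ++ ((st :: pvOffsets st sizes).zip (pvOffsets st sizes)).map
        (fun ab => PySem.List.slice inputs (some ab.1) (some ab.2)) := by
  intro sizes
  induction sizes with
  | nil => intro st acc; simp [pvOffsets]
  | cons s rest ih =>
      intro st acc
      simp only [List.foldl_cons, pvOffsets, List.zip_cons_cons, List.map_cons]
      rw [ih (st + s)]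
      simp

-- ===== VERDICT (by name: the statement is the Claim_ definition above) =====
theorem split_to_list_spec : Claim_equal_split_to_list := by
  intro inputs sizes _
  unfold Spec_split_to_list split_to_list split_to_list_alt
  simpa using split_foldl_eq inputs sizes 0 []
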